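-- pv_equiv track=rewrite | github.com/BorisBondarenko/Code_wars | 24_Directions_Reduction/Directions_Reduction.py | recycle
-- ===== SOURCE A (Python) =====
-- def recycle(seq):
--     tmp = seq[:]
--     for i in range(len(tmp) - 1):
--         if tmp[i] == tmp[i + 1]:
--             continue
--         elif abs(tmp[i]) == abs(tmp[i + 1]):
--             tmp.pop(i)
--             tmp.pop(i)
--             return recycle(tmp)
--         else:
--             continue
--     if tmp == seq:
--         return tmp
-- ===== SOURCE B (Python) =====
-- def recycle(seq):
--     stack = []
--     for d in seq:
--         if stack and stack[-1] == -d and stack[-1] != d: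
--             stack.pop()
--         else:
--             stack.append(d)
--     return stack
-- ===== Notes on version B (the rewrite author's own statement) =====
-- stated objective: alternative
-- what changed: Replaced A's restart-from-scratch recursion (scan for the first adjacent opposite pair, remove it with two pops, recurse on the whole list) with a single left-to-right pass maintaining a stack that pops its top when the incoming element is its opposite.
import Mathlib
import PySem

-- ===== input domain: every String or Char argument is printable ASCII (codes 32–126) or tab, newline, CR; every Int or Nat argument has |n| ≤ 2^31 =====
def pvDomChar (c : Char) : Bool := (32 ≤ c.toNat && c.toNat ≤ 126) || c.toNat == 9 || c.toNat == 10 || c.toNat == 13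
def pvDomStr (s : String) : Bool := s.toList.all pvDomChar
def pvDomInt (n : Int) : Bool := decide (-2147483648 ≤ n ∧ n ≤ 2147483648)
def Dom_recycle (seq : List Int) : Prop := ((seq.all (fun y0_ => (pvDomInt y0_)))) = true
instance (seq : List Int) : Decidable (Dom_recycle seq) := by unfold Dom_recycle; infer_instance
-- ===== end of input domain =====

-- B replaces A's "find first adjacent opposite pair, remove it, restart" recursion
-- with a single left-to-right stack pass (objective: alternative single-pass algorithm).

-- ===== PORT A =====
-- the loop `for i in range(len(tmp)-1)` with its continue/elif: index of the first i with
-- tmp[i] != tmp[i+1] and abs(tmp[i]) == abs(tmp[i+1]), none if the loop falls through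
def firstOpp? : List Int → Option Nat
  | x :: y :: rest =>
      if x = y then (firstOpp? (y :: rest)).map (· + 1)
      else if x.natAbs = y.natAbs then some 0
      else (firstOpp? (y :: rest)).map (· + 1)
  | _ => none

theorem firstOpp?_lt : ∀ {l : List Int} {i : Nat}, firstOpp? l = some i → i + 1 < l.length := by
  intro l
  induction l with
  | nil => intro i h; simp [firstOpp?] at h
  | cons x t ih =>
    intro i h
    cases t with
    | nil => simp [firstOpp?] at h
    | cons y r =>
      simp only [firstOpp?] at h
      split_ifs at h with h1 h2
      · rcases Option.map_eq_some_iff.mp h with ⟨j, hj, rfl⟩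
        have := ih hj; simp only [List.length_cons] at this ⊢; omega
      · cases h; simp only [List.length_cons]; omega
      · rcases Option.map_eq_some_iff.mp h with ⟨j, hj, rfl⟩
        have := ih hj; simp only [List.length_cons] at this ⊢; omega

-- tmp.pop(i); tmp.pop(i)  — remove the elements at positions i and i+1
def removeTwo (l : List Int) (i : Nat) : List Int := (l.eraseIdx i).eraseIdx i

theorem removeTwo_length {l : List Int} {i : Nat} (h : i + 1 < l.length) :
    (removeTwo l i).length = l.length - 2 := by
  unfold removeTwo
  have h1 : i < (l.eraseIdx i).length := by
    rw [List.length_eraseIdx_of_lt (by omega)]; omega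
  rw [List.length_eraseIdx_of_lt h1, List.length_eraseIdx_of_lt (by omega)]
  omega

def recycle (seq : List Int) : List Int :=
  match h : firstOpp? seq with
  | some i => recycle (removeTwo seq i)
  | none => seq
termination_by seq.length
decreasing_by
  have hi := firstOpp?_lt h
  rw [removeTwo_length hi]; omega

-- ===== PORT B =====
-- Python B keeps the stack as a list with the top at the END; here the stack is a Lean
-- list with the top at the HEAD, so the final stack is reversed once at the end.
def canc (t d : Int) : Bool := t == -d && t != d

def step : List Int → Int → List Int
  | t :: rest, d => if canc t d then rest else d :: t :: rest
  | [], d => [d]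

def recycle_alt (seq : List Int) : List Int := (seq.foldl step []).reverse

-- ===== PRECONDITION & SPEC =====
def Spec_recycle (seq : List Int) (out : List Int) : Prop := out = recycle_alt seq
instance (seq : List Int) (out : List Int) : Decidable (Spec_recycle seq out) := by unfold Spec_recycle; infer_instance

-- ===== CLAIM (what is proved, stated in full; the proofs are below) =====
def Claim_equal_recycle : Prop := ∀ (seq : List Int), Dom_recycle seq → Spec_recycle seq (recycle seq)

-- ===== LEMMAS AND PROOFS =====

-- the stack is always "irreducible": no element would cancel the one below it
def Irred (st : List Int) : Prop := List.IsChain (fun a b => canc b a = false) st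

theorem irred_step {st : List Int} (d : Int) (h : Irred st) : Irred (step st d) := by
  unfold Irred at *
  cases st with
  | nil => exact List.isChain_singleton d
  | cons t rest =>
    simp only [step]
    split_ifs with hc
    · exact (List.isChain_cons.mp h).2
    · exact List.isChain_cons_cons.mpr ⟨by simpa using hc, h⟩

theorem canc_neg {x y : Int} (h : canc x y = true) : y = -x ∧ x ≠ y := by
  simp [canc] at h
  obtain ⟨h1, h2⟩ := h
  exact ⟨by omega, h2⟩

-- removing one cancelling adjacent pair does not change the final stack
theorem step_cancel {st : List Int} {x y : Int} (hst : Irred st) (hc : canc x y = true) :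
    step (step st x) y = st := by
  obtain ⟨hy, hne⟩ := canc_neg hc
  cases st with
  | nil => simp [step, hc]
  | cons t rest =>
    by_cases htx : canc t x = true
    · -- pop t, then y (= t) is pushed back (it cannot cancel rest's head, by Irred)
      obtain ⟨hxt, hnet⟩ := canc_neg htx
      have hyt : y = t := by omega
      simp only [step, htx, if_true]
      cases rest with
      | nil => simp [hyt]
      | cons u r =>
        have hu : canc u t = false := List.isChain_cons_cons.mp hst |>.1
        simp [hyt, hu]
    · -- push x, then y cancels x
      simp [step, htx, hc]

theorem foldl_cancel (a : List Int) {x y : Int} (b : List Int) (st : List Int)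
    (hst : Irred st) (hc : canc x y = true) :
    List.foldl step st (a ++ x :: y :: b) = List.foldl step st (a ++ b) := by
  induction a generalizing st with
  | nil => simp [List.foldl, step_cancel hst hc]
  | cons z a' ih => simpa [List.foldl] using ih (step st z) (irred_step z hst)

-- if no adjacent pair of the input ever cancels, the fold just pushes everything
theorem foldl_push : ∀ (seq st : List Int),
    (∀ t ∈ st.head?, ∀ x ∈ seq.head?, canc t x = false) →
    List.IsChain (fun a b => canc a b = false) seq →
    List.foldl step st seq = seq.reverse ++ st := by
  intro seq
  induction seq with
  | nil => intro st _ _; simp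
  | cons x r ih =>
    intro st hb hch
    have hstep : step st x = x :: st := by
      cases st with
      | nil => rfl
      | cons t u => simp [step, hb t (by simp) x (by simp)]
    rw [List.foldl_cons, hstep,
      ih (x :: st) (by
        intro t ht z hz
        simp only [List.head?_cons, Option.mem_def, Option.some.injEq] at ht
        subst ht
        exact (List.isChain_cons.mp hch).1 z hz) (List.isChain_cons.mp hch).2]
    simp

theorem firstOpp?_none_chain : ∀ {l : List Int}, firstOpp? l = none →
    List.IsChain (fun a b => canc a b = false) l := by
  intro l
  induction l with
  | nil => intro _; exact List.IsChain.nil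
  | cons x t ih =>
    intro h
    cases t with
    | nil => exact List.isChain_singleton x
    | cons y r =>
      simp only [firstOpp?] at h
      split_ifs at h with h1 h2
      · refine List.isChain_cons_cons.mpr ⟨?_, ih (by simpa using h)⟩
        subst h1; simp [canc]
      · refine List.isChain_cons_cons.mpr ⟨?_, ih (by simpa using h)⟩
        by_cases hx : x = -y
        · exact absurd (by rw [hx, Int.natAbs_neg]) h2
        · simp [canc, hx]

theorem firstOpp?_some_split : ∀ {l : List Int} {i : Nat}, firstOpp? l = some i →
    ∃ a x y b, l = a ++ x :: y :: b ∧ a.length = i ∧ canc x y = true := by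
  intro l
  induction l with
  | nil => intro i h; simp [firstOpp?] at h
  | cons x t ih =>
    intro i h
    cases t with
    | nil => simp [firstOpp?] at h
    | cons y r =>
      simp only [firstOpp?] at h
      split_ifs at h with h1 h2
      · rcases Option.map_eq_some_iff.mp h with ⟨j, hj, rfl⟩
        rcases ih hj with ⟨a, u, v, b, heq, hlen, hcanc⟩
        exact ⟨x :: a, u, v, b, by simp [heq], by simp [hlen], hcanc⟩
      · cases h
        refine ⟨[], x, y, r, rfl, rfl, ?_⟩
        have hxy : x = -y := by
          rcases Int.natAbs_eq_natAbs_iff.mp h2 with h | h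
          · exact absurd h h1
          · exact h
        simp [canc]; exact ⟨hxy, h1⟩
      · rcases Option.map_eq_some_iff.mp h with ⟨j, hj, rfl⟩
        rcases ih hj with ⟨a, u, v, b, heq, hlen, hcanc⟩
        exact ⟨x :: a, u, v, b, by simp [heq], by simp [hlen], hcanc⟩

theorem removeTwo_split (a b : List Int) (x y : Int) :
    removeTwo (a ++ x :: y :: b) a.length = a ++ b := by
  unfold removeTwo
  rw [List.eraseIdx_append_of_length_le (le_refl a.length),
      List.eraseIdx_append_of_length_le (le_refl a.length)]
  simp

theorem recycle_eq_alt : ∀ (n : Nat) (seq : List Int), seq.length ≤ n →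
    recycle seq = recycle_alt seq := by
  intro n
  induction n with
  | zero =>
    intro seq hlen
    have : seq = [] := List.length_eq_zero_iff.mp (Nat.le_zero.mp hlen)
    subst this
    rw [recycle.eq_def]
    simp [firstOpp?, recycle_alt]
  | succ n ih =>
    intro seq hlen
    rw [recycle.eq_def]
    cases hf : firstOpp? seq with
    | none =>
      simp only
      have hch := firstOpp?_none_chain hf
      rw [recycle_alt, foldl_push seq [] (by intro t ht; simp at ht) hch]
      simp
    | some i =>
      simp only
      rcases firstOpp?_some_split hf with ⟨a, x, y, b, rfl, rfl, hc⟩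
      rw [removeTwo_split]
      have hlen2 : (a ++ b).length ≤ n := by
        simp only [List.length_append, List.length_cons] at hlen ⊢; omega
      rw [ih _ hlen2]
      simp only [recycle_alt]
      rw [foldl_cancel a b [] List.IsChain.nil hc]

-- ===== VERDICT (by name: the statement is the Claim_ definition above) =====
theorem recycle_spec : Claim_equal_recycle := by
  intro seq _
  exact recycle_eq_alt seq.length seq le_rfl
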